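-- pv_equiv track=rewrite | github.com/binna/coding-test | algorithm_4th/1_week/1018.py | checkFixed
-- ===== SOURCE A (Python) =====
-- def checkFixed(board):
--     result = [0, 0]
--     for i in range(0, len(board), 2):
--         for j in range(0, len(board[i]), 2):
--             if board[i][j] == 'B' and board[i][j + 1] == 'W' and board[i + 1][j] == 'W' and board[i + 1][j + 1] == 'B':
--                 continue
--             if board[i][j] != 'B':
--                 result[0] += 1
--             if board[i][j + 1] != 'W':
--                 result[0] += 1
--             if board[i + 1][j] != 'W':
--                 result[0] += 1
--             if board[i + 1][j + 1] != 'B':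
--                 result[0] += 1
--     for i in range(0, len(board), 2):
--         for j in range(0, len(board[i]), 2):
--             if board[i][j] == 'W' and board[i][j + 1] == 'B' and board[i + 1][j] == 'B' and board[i + 1][j + 1] == 'W':
--                 continue
--             if board[i][j] != 'W':
--                 result[1] += 1
--             if board[i][j + 1] != 'B':
--                 result[1] += 1
--             if board[i + 1][j] != 'B':
--                 result[1] += 1
--             if board[i + 1][j + 1] != 'W':
--                 result[1] += 1
--     return min(result)
-- ===== SOURCE B (Python) =====
-- def checkFixed(board):
--     # Single pass: count mismatches against one checkerboard pattern and a per-cell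
--     # weight whose sum equals count0 + count1; derive the other pattern's count.
--     count0 = 0
--     both = 0  # = count0 + count1: each B/W cell mismatches exactly one pattern, others both
--     for i in range(0, len(board), 2):
--         for j in range(0, len(board[i]), 2):
--             for ch, exp in ((board[i][j], 'B'), (board[i][j + 1], 'W'),
--                             (board[i + 1][j], 'W'), (board[i + 1][j + 1], 'B')):
--                 if ch != exp:
--                     count0 += 1
--                 both += 1 if ch in ('B', 'W') else 2
--     return min(count0, both - count0)
-- ===== Notes on version B (the rewrite author's own statement) =====
-- stated objective: alternative
-- what changed: B replaces A's two full passes over the board (one per target pattern, each with a redundant matched-block skip and four hard-coded per-cell checks) by a single pass that uniformly counts per-cell mismatches against one pattern plus a weight summing to count0+count1, deriving the second pattern's count arithmetically.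
import Mathlib
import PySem

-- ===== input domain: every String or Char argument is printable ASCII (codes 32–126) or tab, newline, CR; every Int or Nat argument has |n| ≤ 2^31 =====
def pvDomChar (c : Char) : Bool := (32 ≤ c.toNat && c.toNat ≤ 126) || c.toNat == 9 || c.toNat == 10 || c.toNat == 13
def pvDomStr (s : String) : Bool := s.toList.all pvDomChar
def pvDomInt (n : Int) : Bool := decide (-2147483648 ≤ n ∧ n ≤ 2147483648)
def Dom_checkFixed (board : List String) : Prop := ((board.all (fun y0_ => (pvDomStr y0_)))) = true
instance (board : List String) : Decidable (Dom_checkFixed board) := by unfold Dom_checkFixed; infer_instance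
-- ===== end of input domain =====

-- B replaces A's two block-stepping passes (one per target pattern, each with a
-- redundant matched-block skip) by a single pass that counts mismatches against one
-- pattern plus a per-cell weight summing to count0 + count1, deriving the other count.

-- ===== PORT A =====
def checkFixed (board : List String) : Int :=
  let r0 : Int := (PySem.List.pyRange 0 (board.length : Int) 2).foldl (fun r0 i =>
    let row := PySem.List.pyGetD board i ""
    (PySem.List.pyRange 0 (PySem.Str.len row) 2).foldl (fun r0 j =>
      let a := (PySem.Str.pyGet? row j).getD ' '
      let b := (PySem.Str.pyGet? row (j + 1)).getD ' '
      let row2 := PySem.List.pyGetD board (i + 1) ""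
      let c := (PySem.Str.pyGet? row2 j).getD ' '
      let d := (PySem.Str.pyGet? row2 (j + 1)).getD ' '
      if a = 'B' ∧ b = 'W' ∧ c = 'W' ∧ d = 'B' then r0
      else r0 + (if a ≠ 'B' then 1 else 0) + (if b ≠ 'W' then 1 else 0)
             + (if c ≠ 'W' then 1 else 0) + (if d ≠ 'B' then 1 else 0)) r0) 0
  let r1 : Int := (PySem.List.pyRange 0 (board.length : Int) 2).foldl (fun r1 i =>
    let row := PySem.List.pyGetD board i ""
    (PySem.List.pyRange 0 (PySem.Str.len row) 2).foldl (fun r1 j =>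
      let a := (PySem.Str.pyGet? row j).getD ' '
      let b := (PySem.Str.pyGet? row (j + 1)).getD ' '
      let row2 := PySem.List.pyGetD board (i + 1) ""
      let c := (PySem.Str.pyGet? row2 j).getD ' '
      let d := (PySem.Str.pyGet? row2 (j + 1)).getD ' '
      if a = 'W' ∧ b = 'B' ∧ c = 'B' ∧ d = 'W' then r1
      else r1 + (if a ≠ 'W' then 1 else 0) + (if b ≠ 'B' then 1 else 0)
             + (if c ≠ 'B' then 1 else 0) + (if d ≠ 'W' then 1 else 0)) r1) 0
  min r0 r1

-- ===== PORT B =====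
def checkFixed_alt (board : List String) : Int :=
  let st : Int × Int := (PySem.List.pyRange 0 (board.length : Int) 2).foldl (fun st i =>
    let row := PySem.List.pyGetD board i ""
    (PySem.List.pyRange 0 (PySem.Str.len row) 2).foldl (fun st j =>
      let row2 := PySem.List.pyGetD board (i + 1) ""
      ([((PySem.Str.pyGet? row j).getD ' ', 'B'),
        ((PySem.Str.pyGet? row (j + 1)).getD ' ', 'W'),
        ((PySem.Str.pyGet? row2 j).getD ' ', 'W'),
        ((PySem.Str.pyGet? row2 (j + 1)).getD ' ', 'B')]).foldl (fun st ce =>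
          ((if ce.1 ≠ ce.2 then st.1 + 1 else st.1),
           st.2 + (if ce.1 = 'B' ∨ ce.1 = 'W' then 1 else 2))) st) st) (0, 0)
  min st.1 (st.2 - st.1)

-- ===== PRECONDITION & SPEC =====
-- Pre_ excludes exactly the boards on which the Python A raises IndexError: an
-- even-indexed row of odd length, or a nonempty even-indexed row without a
-- following row at least as long.
def Pre_checkFixed (board : List String) : Prop :=
  ∀ i ∈ List.range board.length, i % 2 = 0 →
    (PySem.Str.len (board.getD i "")) % 2 = 0 ∧
    (board.getD i "" ≠ "" →
      i + 1 < board.length ∧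
      PySem.Str.len (board.getD i "") ≤ PySem.Str.len (board.getD (i + 1) ""))
instance (board : List String) : Decidable (Pre_checkFixed board) := by
  unfold Pre_checkFixed; infer_instance
def pvWitness_checkFixed : List String := (["BW", "WB"])
def Spec_checkFixed (board : List String) (out : Int) : Prop := out = checkFixed_alt board
instance (board : List String) (out : Int) : Decidable (Spec_checkFixed board out) := by unfold Spec_checkFixed; infer_instance

-- ===== CLAIM (what is proved, stated in full; the proofs are below) =====
def Claim_equal_checkFixed : Prop := ∀ (board : List String), Dom_checkFixed board → Pre_checkFixed board → Spec_checkFixed board (checkFixed board)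

-- ===== LEMMAS AND PROOFS =====

-- the character of board[i][j] as both ports read it
def pvCell (board : List String) (i j : Int) : Char :=
  (PySem.Str.pyGet? (PySem.List.pyGetD board i "") j).getD ' '

def pvMis (c e : Char) : Int := if c ≠ e then 1 else 0
def pvWt (c : Char) : Int := if c = 'B' ∨ c = 'W' then 1 else 2

def pvBlk0 (board : List String) (i j : Int) : Int :=
  pvMis (pvCell board i j) 'B' + pvMis (pvCell board i (j + 1)) 'W'
    + pvMis (pvCell board (i + 1) j) 'W' + pvMis (pvCell board (i + 1) (j + 1)) 'B'
def pvBlkW (board : List String) (i j : Int) : Int :=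
  pvWt (pvCell board i j) + pvWt (pvCell board i (j + 1))
    + pvWt (pvCell board (i + 1) j) + pvWt (pvCell board (i + 1) (j + 1))

def pvRow0 (board : List String) (i : Int) : Int :=
  (((PySem.List.pyRange 0 (PySem.Str.len (PySem.List.pyGetD board i "")) 2)).map
    (pvBlk0 board i)).sum
def pvRowW (board : List String) (i : Int) : Int :=
  (((PySem.List.pyRange 0 (PySem.Str.len (PySem.List.pyGetD board i "")) 2)).map
    (pvBlkW board i)).sum

def pvS0 (board : List String) : Int :=
  (((PySem.List.pyRange 0 (board.length : Int) 2)).map (pvRow0 board)).sum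
def pvSW (board : List String) : Int :=
  (((PySem.List.pyRange 0 (board.length : Int) 2)).map (pvRowW board)).sum

lemma sum_map_sub_int {α : Type} (l : List α) (f g : α → Int) :
    (l.map (fun x => f x - g x)).sum = (l.map f).sum - (l.map g).sum := by
  induction l with
  | nil => simp
  | cons x xs ih => simp [ih]; ring

-- per-character fact: a cell mismatching one pattern relates to the other via its weight
lemma mis_compl (x : Char) : pvMis x 'W' = pvWt x - pvMis x 'B' := by
  by_cases h1 : x = 'B' <;> by_cases h2 : x = 'W' <;> simp [pvMis, pvWt, h1, h2]

lemma mis_compl' (x : Char) : pvMis x 'B' = pvWt x - pvMis x 'W' := by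
  have := mis_compl x; omega


-- per-block facts used by all three loop rewrites
lemma blk0_leaf (a b c d : Char) (acc : Int) :
    (if a = 'B' ∧ b = 'W' ∧ c = 'W' ∧ d = 'B' then acc
     else acc + (if a ≠ 'B' then 1 else 0) + (if b ≠ 'W' then 1 else 0)
            + (if c ≠ 'W' then 1 else 0) + (if d ≠ 'B' then 1 else 0))
      = acc + (pvMis a 'B' + pvMis b 'W' + pvMis c 'W' + pvMis d 'B') := by
  by_cases h : a = 'B' ∧ b = 'W' ∧ c = 'W' ∧ d = 'B'
  · rw [if_pos h]; obtain ⟨h1, h2, h3, h4⟩ := h; subst h1; subst h2; subst h3; subst h4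
    simp [pvMis]
  · rw [if_neg h]; simp only [pvMis]; ring

lemma blk1_leaf (a b c d : Char) (acc : Int) :
    (if a = 'W' ∧ b = 'B' ∧ c = 'B' ∧ d = 'W' then acc
     else acc + (if a ≠ 'W' then 1 else 0) + (if b ≠ 'B' then 1 else 0)
            + (if c ≠ 'B' then 1 else 0) + (if d ≠ 'W' then 1 else 0))
      = acc + ((pvWt a + pvWt b + pvWt c + pvWt d)
          - (pvMis a 'B' + pvMis b 'W' + pvMis c 'W' + pvMis d 'B')) := by
  have e1 := mis_compl a
  have e2 := mis_compl' b
  have e3 := mis_compl' c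
  have e4 := mis_compl d
  by_cases h : a = 'W' ∧ b = 'B' ∧ c = 'B' ∧ d = 'W'
  · rw [if_pos h]; obtain ⟨h1, h2, h3, h4⟩ := h; subst h1; subst h2; subst h3; subst h4
    simp [pvMis, pvWt]
  · rw [if_neg h]
    rw [show (if a ≠ 'W' then (1 : Int) else 0) = pvMis a 'W' from rfl,
        show (if b ≠ 'B' then (1 : Int) else 0) = pvMis b 'B' from rfl,
        show (if c ≠ 'B' then (1 : Int) else 0) = pvMis c 'B' from rfl,
        show (if d ≠ 'W' then (1 : Int) else 0) = pvMis d 'W' from rfl,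
        e1, e2, e3, e4]
    ring

lemma blkB_leaf (a b c d : Char) (st : Int × Int) :
    (([(a, 'B'), (b, 'W'), (c, 'W'), (d, 'B')]).foldl (fun st ce =>
        ((if ce.1 ≠ ce.2 then st.1 + 1 else st.1),
         st.2 + (if ce.1 = 'B' ∨ ce.1 = 'W' then 1 else 2))) st)
      = (st.1 + (pvMis a 'B' + pvMis b 'W' + pvMis c 'W' + pvMis d 'B'),
         st.2 + (pvWt a + pvWt b + pvWt c + pvWt d)) := by
  simp only [List.foldl]
  rw [Prod.ext_iff]
  constructor <;> simp only [pvMis, pvWt] <;> split_ifs <;> simp_all <;> ring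

-- A's first pass computes pvS0
lemma A0_eq (board : List String) :
    ((PySem.List.pyRange 0 (board.length : Int) 2).foldl (fun r0 i =>
      let row := PySem.List.pyGetD board i ""
      (PySem.List.pyRange 0 (PySem.Str.len row) 2).foldl (fun r0 j =>
        let a := (PySem.Str.pyGet? row j).getD ' '
        let b := (PySem.Str.pyGet? row (j + 1)).getD ' '
        let row2 := PySem.List.pyGetD board (i + 1) ""
        let c := (PySem.Str.pyGet? row2 j).getD ' '
        let d := (PySem.Str.pyGet? row2 (j + 1)).getD ' '
        if a = 'B' ∧ b = 'W' ∧ c = 'W' ∧ d = 'B' then r0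
        else r0 + (if a ≠ 'B' then 1 else 0) + (if b ≠ 'W' then 1 else 0)
               + (if c ≠ 'W' then 1 else 0) + (if d ≠ 'B' then 1 else 0)) r0) 0)
      = pvS0 board := by
  rw [PySem.List.foldl_congr_mem'
      (g := fun r0 i => r0 + pvRow0 board i)]
  · rw [PySem.List.foldl_add]; simp [pvS0]
  · intro i _ acc
    rw [PySem.List.foldl_congr_mem' (g := fun r0 j => r0 + pvBlk0 board i j)]
    · rw [PySem.List.foldl_add]; simp [pvRow0]
    · intro j _ acc2
      exact blk0_leaf _ _ _ _ acc2

-- A's second pass computes pvSW - pvS0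
lemma A1_eq (board : List String) :
    ((PySem.List.pyRange 0 (board.length : Int) 2).foldl (fun r1 i =>
      let row := PySem.List.pyGetD board i ""
      (PySem.List.pyRange 0 (PySem.Str.len row) 2).foldl (fun r1 j =>
        let a := (PySem.Str.pyGet? row j).getD ' '
        let b := (PySem.Str.pyGet? row (j + 1)).getD ' '
        let row2 := PySem.List.pyGetD board (i + 1) ""
        let c := (PySem.Str.pyGet? row2 j).getD ' '
        let d := (PySem.Str.pyGet? row2 (j + 1)).getD ' '
        if a = 'W' ∧ b = 'B' ∧ c = 'B' ∧ d = 'W' then r1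
        else r1 + (if a ≠ 'W' then 1 else 0) + (if b ≠ 'B' then 1 else 0)
               + (if c ≠ 'B' then 1 else 0) + (if d ≠ 'W' then 1 else 0)) r1) 0)
      = pvSW board - pvS0 board := by
  rw [PySem.List.foldl_congr_mem'
      (g := fun r1 i => r1 + (pvRowW board i - pvRow0 board i))]
  · rw [PySem.List.foldl_add]
    simp only [pvSW, pvS0, zero_add]
    rw [← sum_map_sub_int]
  · intro i _ acc
    rw [PySem.List.foldl_congr_mem'
        (g := fun r1 j => r1 + (pvBlkW board i j - pvBlk0 board i j))]
    · rw [PySem.List.foldl_add]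
      simp only [pvRowW, pvRow0]
      rw [← sum_map_sub_int]
    · intro j _ acc2
      exact blk1_leaf _ _ _ _ acc2

-- B computes (pvS0, pvSW)
lemma B_eq (board : List String) :
    checkFixed_alt board = min (pvS0 board) (pvSW board - pvS0 board) := by
  unfold checkFixed_alt
  rw [PySem.List.foldl_congr_mem'
      (g := fun (st : Int × Int) i => (st.1 + pvRow0 board i, st.2 + pvRowW board i))]
  · rw [PySem.List.foldl_prod_mk (f := fun a i => a + pvRow0 board i)
        (g := fun b i => b + pvRowW board i)]
    rw [PySem.List.foldl_add, PySem.List.foldl_add]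
    simp [pvS0, pvSW]
  · intro i _ acc
    rw [PySem.List.foldl_congr_mem'
        (g := fun (st : Int × Int) j => (st.1 + pvBlk0 board i j, st.2 + pvBlkW board i j))]
    · rw [PySem.List.foldl_prod_mk (f := fun a j => a + pvBlk0 board i j)
          (g := fun b j => b + pvBlkW board i j)]
      rw [PySem.List.foldl_add, PySem.List.foldl_add]
      rw [Prod.ext_iff]
      constructor <;> simp [pvRow0, pvRowW]
    · intro j _ acc2
      exact blkB_leaf _ _ _ _ acc2

-- ===== VERDICT (by name: the statement is the Claim_ definition above) =====
theorem checkFixed_spec : Claim_equal_checkFixed := by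
  intro board _ _
  unfold Spec_checkFixed
  rw [B_eq]
  show min _ _ = _
  rw [A0_eq, A1_eq]
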